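-- pv_equiv track=rewrite | github.com/UC-Davis-molecular-computing/nuad | nuad/vienna_nupack.py | domain_concatenated_no_4g_or_4c
-- ===== SOURCE A (Python) =====
-- from typing import Sequence, Tuple, List, Iterable
--
-- def domain_concatenated_no_4g_or_4c(seq: str, seqs: Sequence[str]) -> bool:
--     """prevent G^4 and C^4 under concatenation"""
--     for altseq in seqs:
--         catseq = altseq + seq + altseq
--         if 'GGGG' in catseq:
--             #             print '|GGGG# seq: %s altseq: %s|' % (seq,altseq)
--             return False
--         if 'CCCC' in catseq:
--             #             print '|CCCC# seq: %s altseq: %s|' % (seq,altseq)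
--             return False
--     return True
-- ===== SOURCE B (Python) =====
-- def domain_concatenated_no_4g_or_4c(seq, seqs):
--     """prevent G^4 and C^4 under concatenation — scan seq once, then per altseq
--     only the altseq itself plus O(1)-size boundary junction windows"""
--     def bad(s):
--         return 'GGGG' in s or 'CCCC' in s
--     if not seqs:
--         return True
--     if bad(seq):
--         return False
--     if len(seq) < 3:
--         # seq too short for a run to sit between the junctions: one combined window
--         return not any(bad(a) or bad(a[-3:] + seq + a[:3]) for a in seqs)
--     head, tail = seq[:3], seq[-3:]
--     return not any(bad(a) or bad(a[-3:] + head) or bad(tail + a[:3]) for a in seqs)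
-- ===== Notes on version B (the rewrite author's own statement) =====
-- stated objective: faster
-- what changed: Instead of building and scanning altseq+seq+altseq for every altseq, B scans seq once and per altseq scans only the altseq plus constant-size (<=3-char) boundary junction windows, so seq is no longer rescanned per altseq.
import Mathlib
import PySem

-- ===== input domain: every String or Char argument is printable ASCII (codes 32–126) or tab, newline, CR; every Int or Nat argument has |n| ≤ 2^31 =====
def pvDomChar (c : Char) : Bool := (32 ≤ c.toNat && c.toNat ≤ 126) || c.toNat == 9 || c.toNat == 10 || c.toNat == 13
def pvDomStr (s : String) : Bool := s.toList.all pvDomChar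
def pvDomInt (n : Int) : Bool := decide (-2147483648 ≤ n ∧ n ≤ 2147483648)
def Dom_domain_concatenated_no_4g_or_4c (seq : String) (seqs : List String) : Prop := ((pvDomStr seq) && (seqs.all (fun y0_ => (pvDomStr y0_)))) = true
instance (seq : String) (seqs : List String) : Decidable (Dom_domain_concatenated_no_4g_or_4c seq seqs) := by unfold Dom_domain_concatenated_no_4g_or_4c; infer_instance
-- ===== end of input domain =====

-- B replaces A's per-altseq scan of altseq+seq+altseq by one scan of seq plus, per altseq,
-- a scan of altseq and O(1)-size boundary junction windows (objective: faster, asymptotic).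


-- ===== PORT A =====
-- the two patterns 'GGGG' and 'CCCC' as char lists
def pvGGGG : List Char := ['G','G','G','G']
def pvCCCC : List Char := ['C','C','C','C']

-- A's loop over seqs: build catseq = altseq + seq + altseq, test the two substrings, early-return False
def pvAGo (seq : List Char) : List String → Bool
  | [] => true
  | alt :: rest =>
    let cat := alt.toList ++ seq ++ alt.toList
    if PySem.Chars.isIn pvGGGG cat then false
    else if PySem.Chars.isIn pvCCCC cat then false
    else pvAGo seq rest

def domain_concatenated_no_4g_or_4c (seq : String) (seqs : List String) : Bool :=
  pvAGo seq.toList seqs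

-- ===== PORT B =====
-- bad(s) = 'GGGG' in s or 'CCCC' in s
def pvBad (w : List Char) : Bool :=
  PySem.Chars.isIn pvGGGG w || PySem.Chars.isIn pvCCCC w

-- transliteration of Source B (head/tail inlined); slices on char lists: a[:3] = take 3, a[-3:] = drop (len-3)
def domain_concatenated_no_4g_or_4c_alt (seq : String) (seqs : List String) : Bool :=
  if seqs.isEmpty then true                    -- if not seqs: return True
  else if pvBad seq.toList then false          -- if bad(seq): return False
  else if seq.toList.length < 3 then           -- if len(seq) < 3: one combined junction window
    !(seqs.any fun a =>
        pvBad a.toList ||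
        pvBad (a.toList.drop (a.toList.length - 3) ++ seq.toList ++ a.toList.take 3))
  else                                         -- two junction windows a[-3:]+seq[:3], seq[-3:]+a[:3]
    !(seqs.any fun a =>
        pvBad a.toList ||
        pvBad (a.toList.drop (a.toList.length - 3) ++ seq.toList.take 3) ||
        pvBad (seq.toList.drop (seq.toList.length - 3) ++ a.toList.take 3))

-- ===== PRECONDITION & SPEC =====
def Spec_domain_concatenated_no_4g_or_4c (seq : String) (seqs : List String) (out : Bool) : Prop := out = domain_concatenated_no_4g_or_4c_alt seq seqs
instance (seq : String) (seqs : List String) (out : Bool) : Decidable (Spec_domain_concatenated_no_4g_or_4c seq seqs out) := by unfold Spec_domain_concatenated_no_4g_or_4c; infer_instance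

-- ===== CLAIM (what is proved, stated in full; the proofs are below) =====
def Claim_equal_domain_concatenated_no_4g_or_4c : Prop := ∀ (seq : String) (seqs : List String), Dom_domain_concatenated_no_4g_or_4c seq seqs → Spec_domain_concatenated_no_4g_or_4c seq seqs (domain_concatenated_no_4g_or_4c seq seqs)

-- ===== LEMMAS AND PROOFS =====

-- dropping past u lands in v
theorem pvDrop_append_ge (u v : List Char) (j : ℕ) (h : u.length ≤ j) :
    (u ++ v).drop j = v.drop (j - u.length) := by
  induction u generalizing j with
  | nil => simp
  | cons x xs ih =>
    cases j with
    | zero => simp at h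
    | succ j => simpa using ih j (by simpa using h)

-- a length-n window of u ++ v that fits inside u
theorem pvWindow_left (u v : List Char) (j n : ℕ) (h : j + n ≤ u.length) :
    ((u ++ v).drop j).take n = (u.drop j).take n := by
  rw [List.drop_append_of_le_length (by omega), List.take_append_of_le_length (by simp; omega)]

-- any length-n window of w is an infix of w
theorem pvWindow_infix (w : List Char) (j n : ℕ) : ((w.drop j).take n) <:+: w :=
  ((w.drop j).take_prefix _).isInfix.trans (w.drop_suffix j).isInfix

-- p is an infix of w iff p is some |p|-window of w
theorem pvInfix_iff_window (p w : List Char) :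
    p <:+: w ↔ ∃ j, j + p.length ≤ w.length ∧ p = (w.drop j).take p.length := by
  constructor
  · rintro ⟨u, v, rfl⟩
    refine ⟨u.length, by simp only [List.length_append]; omega, ?_⟩
    rw [List.append_assoc, pvDrop_append_ge u (p ++ v) u.length (le_refl _)]
    simp
  · rintro ⟨j, _, h⟩
    rw [h]
    exact pvWindow_infix w j p.length

-- L1: a length-4 pattern occurs in a++seq++a iff it occurs in a or in the
-- combined boundary window  a[-3:] ++ seq ++ a[:3]
theorem pvL1 (p a s : List Char) (hp : p.length = 4) :
    p <:+: (a ++ s ++ a) ↔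
      p <:+: a ∨ p <:+: (a.drop (a.length - 3) ++ s ++ a.take 3) := by
  have hM : a ++ s ++ a
      = a.take (a.length - 3) ++ ((a.drop (a.length - 3) ++ s ++ a.take 3) ++ a.drop 3) := by
    calc a ++ s ++ a
        = (a.take (a.length - 3) ++ a.drop (a.length - 3)) ++ s ++ (a.take 3 ++ a.drop 3) := by
          rw [List.take_append_drop, List.take_append_drop]
      _ = _ := by simp only [List.append_assoc]
  constructor
  · intro h
    rw [pvInfix_iff_window, hp] at h
    obtain ⟨j, hj, hpw⟩ := h
    simp only [List.length_append] at hj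
    by_cases h1 : j + 4 ≤ a.length
    · left
      rw [List.append_assoc] at hpw
      rw [pvWindow_left a (s ++ a) j 4 h1] at hpw
      rw [pvInfix_iff_window, hp]
      exact ⟨j, by omega, hpw⟩
    · by_cases h2 : a.length + s.length ≤ j
      · left
        rw [pvDrop_append_ge (a ++ s) a j (by simp; omega)] at hpw
        rw [pvInfix_iff_window, hp]
        exact ⟨j - (a ++ s).length, by simp only [List.length_append]; omega, hpw⟩
      · right
        rw [hM] at hpw
        rw [pvDrop_append_ge _ _ j (by simp; omega)] at hpw
        rw [pvWindow_left _ _ _ 4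
          (by simp only [List.length_append, List.length_take, List.length_drop]; omega)] at hpw
        rw [pvInfix_iff_window, hp]
        refine ⟨j - (a.take (a.length - 3)).length, ?_, hpw⟩
        simp only [List.length_append, List.length_take, List.length_drop]
        omega
  · rintro (h | h)
    · exact h.trans ⟨[], s ++ a, by simp⟩
    · exact h.trans ⟨a.take (a.length - 3), a.drop 3, by rw [hM, List.append_assoc]⟩

-- L2: in x ++ s ++ y with |s| ≥ 3, a length-4 pattern occurs iff it occurs in s,
-- in x ++ s[:3], or in s[-3:] ++ y
theorem pvL2 (p x s y : List Char) (hp : p.length = 4) (hs : 3 ≤ s.length) :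
    p <:+: (x ++ s ++ y) ↔
      p <:+: s ∨ p <:+: (x ++ s.take 3) ∨ p <:+: (s.drop (s.length - 3) ++ y) := by
  have hd1 : x ++ s ++ y = (x ++ s.take 3) ++ (s.drop 3 ++ y) := by
    calc x ++ s ++ y = x ++ (s.take 3 ++ s.drop 3) ++ y := by rw [List.take_append_drop]
      _ = _ := by simp only [List.append_assoc]
  have hd2 : x ++ s ++ y
      = (x ++ s.take (s.length - 3)) ++ (s.drop (s.length - 3) ++ y) := by
    calc x ++ s ++ y = x ++ (s.take (s.length - 3) ++ s.drop (s.length - 3)) ++ y := by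
          rw [List.take_append_drop]
      _ = _ := by simp only [List.append_assoc]
  constructor
  · intro h
    rw [pvInfix_iff_window, hp] at h
    obtain ⟨j, hj, hpw⟩ := h
    simp only [List.length_append] at hj
    by_cases h1 : j + 4 ≤ x.length + 3
    · right; left
      rw [hd1] at hpw
      rw [pvWindow_left _ _ _ 4
        (by simp only [List.length_append, List.length_take]; omega)] at hpw
      rw [pvInfix_iff_window, hp]
      refine ⟨j, ?_, hpw⟩
      simp only [List.length_append, List.length_take]
      omega
    · by_cases h2 : x.length + (s.length - 3) ≤ j
      · right; right
        rw [hd2] at hpw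
        rw [pvDrop_append_ge _ _ j
          (by simp only [List.length_append, List.length_take]; omega)] at hpw
        rw [pvInfix_iff_window, hp]
        refine ⟨j - (x ++ s.take (s.length - 3)).length, ?_, hpw⟩
        simp only [List.length_append, List.length_take, List.length_drop]
        omega
      · left
        rw [List.append_assoc] at hpw
        rw [pvDrop_append_ge x (s ++ y) j (by omega)] at hpw
        rw [pvWindow_left s y _ 4 (by omega)] at hpw
        rw [pvInfix_iff_window, hp]
        exact ⟨j - x.length, by omega, hpw⟩
  · rintro (h | h | h)
    · exact h.trans ⟨x, y, by simp [List.append_assoc]⟩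
    · exact h.trans ⟨[], s.drop 3 ++ y, by rw [hd1]; simp⟩
    · exact h.trans ⟨x ++ s.take (s.length - 3), [], by rw [hd2]; simp⟩

-- Bool versions on pvBad
theorem pvBad_eq_true_iff (w : List Char) :
    pvBad w = true ↔ pvGGGG <:+: w ∨ pvCCCC <:+: w := by
  simp [pvBad, PySem.Chars.isIn_iff_infix]

theorem pvBad_concat_short (a s : List Char) :
    pvBad (a ++ s ++ a)
      = (pvBad a || pvBad (a.drop (a.length - 3) ++ s ++ a.take 3)) := by
  have h : ∀ b b' : Bool, (b = true ↔ b' = true) → b = b' := by decide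
  apply h
  simp only [Bool.or_eq_true, pvBad_eq_true_iff]
  rw [pvL1 pvGGGG a s (by decide), pvL1 pvCCCC a s (by decide)]
  tauto

theorem pvBad_concat_long (a s : List Char) (hs : 3 ≤ s.length) (hns : pvBad s = false) :
    pvBad (a ++ s ++ a)
      = (pvBad a || pvBad (a.drop (a.length - 3) ++ s.take 3)
          || pvBad (s.drop (s.length - 3) ++ a.take 3)) := by
  have h : ∀ b b' : Bool, (b = true ↔ b' = true) → b = b' := by decide
  apply h
  have hns' : ¬ (pvGGGG <:+: s ∨ pvCCCC <:+: s) := by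
    rw [← pvBad_eq_true_iff]; simp [hns]
  simp only [Bool.or_eq_true, pvBad_eq_true_iff]
  rw [pvL1 pvGGGG a s (by decide), pvL1 pvCCCC a s (by decide),
      pvL2 pvGGGG _ s _ (by decide) hs, pvL2 pvCCCC _ s _ (by decide) hs]
  tauto

-- A's loop is the negated 'any' of pvBad over the concatenations
theorem pvAGo_eq_any (s : List Char) (seqs : List String) :
    pvAGo s seqs = !(seqs.any (fun a => pvBad (a.toList ++ s ++ a.toList))) := by
  induction seqs with
  | nil => rfl
  | cons a rest ih =>
    simp only [pvAGo, List.any_cons, ih]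
    generalize (a.toList ++ s ++ a.toList) = cat
    cases hg : PySem.Chars.isIn pvGGGG cat <;>
      cases hc : PySem.Chars.isIn pvCCCC cat <;>
        simp [pvBad, hg, hc]

theorem pvAny_congr {α : Type} (l : List α) (f g : α → Bool)
    (h : ∀ x ∈ l, f x = g x) : l.any f = l.any g := by
  induction l with
  | nil => rfl
  | cons a rest ih =>
    simp only [List.any_cons, h a (by simp), ih (fun x hx => h x (by simp [hx]))]

-- ===== VERDICT (by name: the statement is the Claim_ definition above) =====
theorem domain_concatenated_no_4g_or_4c_spec : Claim_equal_domain_concatenated_no_4g_or_4c := by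
  intro seq seqs _
  unfold Spec_domain_concatenated_no_4g_or_4c
  unfold domain_concatenated_no_4g_or_4c domain_concatenated_no_4g_or_4c_alt
  rw [pvAGo_eq_any]
  cases seqs with
  | nil => rfl
  | cons a0 rest =>
    rw [if_neg (by simp)]
    by_cases hb : pvBad seq.toList = true
    · rw [if_pos hb]
      have hcat : pvBad (a0.toList ++ seq.toList ++ a0.toList) = true := by
        rw [pvBad_eq_true_iff] at hb ⊢
        have hinf : seq.toList <:+: (a0.toList ++ seq.toList ++ a0.toList) :=
          ⟨a0.toList, a0.toList, rfl⟩
        rcases hb with h | h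
        · exact Or.inl (h.trans hinf)
        · exact Or.inr (h.trans hinf)
      simp only [List.any_cons, hcat, Bool.true_or, Bool.not_true]
    · rw [if_neg hb]
      by_cases hlen : seq.toList.length < 3
      · rw [if_pos hlen]
        congr 1
        exact pvAny_congr _ _ _ (fun a _ => pvBad_concat_short a.toList seq.toList)
      · rw [if_neg hlen]
        congr 1
        exact pvAny_congr _ _ _
          (fun a _ => pvBad_concat_long a.toList seq.toList (by omega) (by simpa using hb))
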